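-- pv_equiv track=rewrite | github.com/hdlldh/leetcode_python | leetcode/editor/en/[1037]Valid Boomerang.py | isBoomerang
-- ===== SOURCE A (Python) =====
-- def isBoomerang(points):
--     """
--     :type points: List[List[int]]
--     :rtype: bool
--     """
--
--     def gcd(a, b):
--         if b == 0: return a
--         return gcd(b, a % b)
--
--     hashset = set()
--     for i in range(3):
--         for j in range(i + 1, 3):
--             x = points[i][0] - points[j][0]
--             y = points[i][1] - points[j][1]
--             if x == 0 and y == 0: return False
--             # if y<0:
--             #    x = -x
--             #    y = -y
--             d = gcd(x, y)
--             x = x // d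
--             y = y // d
--             hashset.add((x, y))
--     return len(hashset) == 3
-- ===== SOURCE B (Python) =====
-- def isBoomerang(points):
--     x1, y1 = points[0][0], points[0][1]
--     x2, y2 = points[1][0], points[1][1]
--     x3, y3 = points[2][0], points[2][1]
--     return (x2 - x1) * (y3 - y1) - (y2 - y1) * (x3 - x1) != 0
-- ===== Notes on version B (the rewrite author's own statement) =====
-- stated objective: simpler
-- what changed: Replaces the nested pair loop with recursive gcd normalization and a set of directions by a single 2D cross-product determinant test: d != 0 iff the three points are pairwise distinct and non-collinear.
-- outside the precondition, e.g. on isBoomerang([[1, 2], [1, 2], [5]]): A returns False, B raises IndexError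
import Mathlib
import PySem

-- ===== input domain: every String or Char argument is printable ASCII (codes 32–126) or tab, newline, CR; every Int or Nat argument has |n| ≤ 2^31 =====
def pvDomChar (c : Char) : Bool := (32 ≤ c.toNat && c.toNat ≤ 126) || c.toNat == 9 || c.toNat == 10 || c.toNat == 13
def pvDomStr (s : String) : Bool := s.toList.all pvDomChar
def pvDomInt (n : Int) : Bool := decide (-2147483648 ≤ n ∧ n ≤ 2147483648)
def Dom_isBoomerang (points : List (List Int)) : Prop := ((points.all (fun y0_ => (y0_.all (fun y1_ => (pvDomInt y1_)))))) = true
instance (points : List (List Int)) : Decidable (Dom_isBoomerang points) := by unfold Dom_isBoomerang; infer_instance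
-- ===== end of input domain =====

-- B replaces A's gcd-normalized set of pairwise directions by a single cross-product
-- determinant test (objective: simpler; same O(1) cost).

-- ===== PORT A =====
-- helper lemma the recursive gcd's termination cites: Python's floor-mod remainder
-- shrinks in absolute value
theorem pvMod_natAbs_lt (a b : Int) (hb : b ≠ 0) :
    (PySem.Int.mod a b).natAbs < b.natAbs := by
  rcases lt_or_gt_of_ne hb with h | h
  · have := PySem.Int.mod_neg_bounds a h
    omega
  · have h1 := PySem.Int.mod_nonneg a h
    have h2 := PySem.Int.mod_lt a h
    omega

-- literal port of A's inner recursive gcd (Python's % = floor mod)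
def pyGcd (a b : Int) : Int :=
  if h : b = 0 then a else pyGcd b (PySem.Int.mod a b)
termination_by b.natAbs
decreasing_by exact pvMod_natAbs_lt a b h

def isBoomerang (points : List (List Int)) : Bool :=
  -- nested 'for i in range(3): for j in range(i+1, 3)' with the early 'return False'
  -- threaded as a none state; a failing index lookup also yields none (outside Pre_).
  let st : Option (PySem.Set (Int × Int)) :=
    (PySem.List.pyRange 0 3 1).foldl (fun st i =>
      (PySem.List.pyRange (i + 1) 3 1).foldl (fun st j =>
        match st with
        | none => none
        | some s =>
          match PySem.List.pyGet? points i, PySem.List.pyGet? points j with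
          | some pi, some pj =>
            match PySem.List.pyGet? pi 0, PySem.List.pyGet? pj 0,
                  PySem.List.pyGet? pi 1, PySem.List.pyGet? pj 1 with
            | some pi0, some pj0, some pi1, some pj1 =>
              let x := pi0 - pj0
              let y := pi1 - pj1
              if x = 0 ∧ y = 0 then none
              else
                let d := pyGcd x y
                some (PySem.Set.add s (PySem.Int.floordiv x d, PySem.Int.floordiv y d))
            | _, _, _, _ => none
          | _, _ => none) st) (some PySem.Set.empty)
  match st with
  | some s => decide (s.length = 3)
  | none => false

-- ===== PORT B =====
def isBoomerang_alt (points : List (List Int)) : Bool :=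
  (do
    let p0 ← PySem.List.pyGet? points 0
    let p1 ← PySem.List.pyGet? points 1
    let p2 ← PySem.List.pyGet? points 2
    let x1 ← PySem.List.pyGet? p0 0
    let y1 ← PySem.List.pyGet? p0 1
    let x2 ← PySem.List.pyGet? p1 0
    let y2 ← PySem.List.pyGet? p1 1
    let x3 ← PySem.List.pyGet? p2 0
    let y3 ← PySem.List.pyGet? p2 1
    pure (decide ((x2 - x1) * (y3 - y1) - (y2 - y1) * (x3 - x1) ≠ 0))).getD false

-- ===== PRECONDITION & SPEC =====
-- Pre_ asks for three points each carrying both coordinates: outside it both programs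
-- raise IndexError, except that A may hit 'return False' on a coincident first pair
-- before ever reading a missing coordinate of a later point (e.g. [[1,2],[1,2],[5]],
-- where A returns False while B raises IndexError) — those inputs are excluded.
def Pre_isBoomerang (points : List (List Int)) : Prop :=
  3 ≤ points.length ∧ ∀ p ∈ points.take 3, 2 ≤ p.length
instance (points : List (List Int)) : Decidable (Pre_isBoomerang points) := by
  unfold Pre_isBoomerang; infer_instance

def pvWitness_isBoomerang : List (List Int) := [[0, 0], [1, 0], [0, 1]]

def Spec_isBoomerang (points : List (List Int)) (out : Bool) : Prop := out = isBoomerang_alt points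
instance (points : List (List Int)) (out : Bool) : Decidable (Spec_isBoomerang points out) := by
  unfold Spec_isBoomerang; infer_instance

-- ===== CLAIM (what is proved, stated in full; the proofs are below) =====
def Claim_equal_isBoomerang : Prop := ∀ (points : List (List Int)), Dom_isBoomerang points → Pre_isBoomerang points → Spec_isBoomerang points (isBoomerang points)

-- ===== LEMMAS AND PROOFS =====

theorem pyGcd_zero (a : Int) : pyGcd a 0 = a := by unfold pyGcd; simp

theorem pyGcd_of_ne (a b : Int) (h : b ≠ 0) :
    pyGcd a b = pyGcd b (PySem.Int.mod a b) := by
  conv_lhs => unfold pyGcd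
  simp [h]

-- the canonical sign A's gcd produces: positive iff y > 0, or y = 0 and x > 0
def pvSign (x y : Int) : Int :=
  if 0 < y then 1 else if y < 0 then -1 else if 0 < x then 1 else -1

theorem pvSign_cases (x y : Int) : pvSign x y = 1 ∨ pvSign x y = -1 := by
  unfold pvSign; split_ifs <;> simp

theorem pvSign_neg (x y : Int) (h : ¬(x = 0 ∧ y = 0)) :
    pvSign (-x) (-y) = -pvSign x y := by
  unfold pvSign; split_ifs <;> omega

theorem pvSign_mul_pos (n x y : Int) (hn : 0 < n) :
    pvSign (n * x) (n * y) = pvSign x y := by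
  have h1 : (0 < n * y) ↔ (0 < y) := by constructor <;> intro <;> nlinarith
  have h2 : (n * y < 0) ↔ (y < 0) := by constructor <;> intro <;> nlinarith
  have h3 : (0 < n * x) ↔ (0 < x) := by constructor <;> intro <;> nlinarith
  unfold pvSign
  simp only [h1, h2, h3]

theorem pyGcd_base (x : Int) :
    pyGcd x 0 = pvSign x 0 * (Int.gcd x 0 : Int) := by
  rw [pyGcd_zero]
  unfold pvSign
  simp only [Int.gcd_zero_right]
  split_ifs <;> omega

-- A's recursive gcd computes ± the mathematical gcd, the sign chosen so that the
-- normalized direction has positive y (or positive x when y = 0)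
theorem pyGcd_eq_aux : ∀ n : Nat, ∀ x y : Int, y.natAbs ≤ n → ¬(x = 0 ∧ y = 0) →
    pyGcd x y = pvSign x y * (Int.gcd x y : Int) := by
  intro n
  induction n with
  | zero =>
    intro x y hy h
    have hy0 : y = 0 := by omega
    subst hy0
    exact pyGcd_base x
  | succ n ih =>
    intro x y hy h
    by_cases hy0 : y = 0
    · subst hy0; exact pyGcd_base x
    · rw [pyGcd_of_ne x y hy0]
      set r := PySem.Int.mod x y with hr
      have hrabs : r.natAbs < y.natAbs := pvMod_natAbs_lt x y hy0
      have hgcd : Int.gcd y r = Int.gcd x y := by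
        have hfm := PySem.Int.floordiv_mul_add_mod x y
        have hx : x = r + y * PySem.Int.floordiv x y := by linarith
        calc Int.gcd y r = Int.gcd y (r + y * PySem.Int.floordiv x y) := by
              rw [Int.gcd_add_mul_left_right]
          _ = Int.gcd x y := by rw [← hx, Int.gcd_comm]
      by_cases hr0 : r = 0
      · rw [hr0, pyGcd_zero]
        have hdvd : y ∣ x := (PySem.Int.mod_eq_zero_iff_dvd x y).mp hr0
        have : Int.gcd x y = y.natAbs := by
          have := Int.natAbs_dvd_natAbs.mpr hdvd
          unfold Int.gcd
          exact Nat.gcd_eq_right this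
        rw [this]
        unfold pvSign
        split_ifs <;> omega
      · rw [ih y r (by omega) (by tauto)]
        rw [hgcd]
        have hsign : pvSign y r = pvSign x y := by
          unfold pvSign
          rcases lt_or_gt_of_ne hy0 with hneg | hpos
          · have := PySem.Int.mod_neg_bounds x hneg
            rw [← hr] at this
            split_ifs <;> omega
          · have h1 := PySem.Int.mod_nonneg x hpos
            have h2 := PySem.Int.mod_lt x hpos
            rw [← hr] at h1 h2
            split_ifs <;> omega
        rw [hsign]

theorem pyGcd_eq (x y : Int) (h : ¬(x = 0 ∧ y = 0)) :
    pyGcd x y = pvSign x y * (Int.gcd x y : Int) :=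
  pyGcd_eq_aux y.natAbs x y le_rfl h

theorem pvFloordiv_eq (a g q : Int) (hg : g ≠ 0) (h : a = q * g) :
    PySem.Int.floordiv a g = q := by
  have h1 := PySem.Int.floordiv_mul_add_mod a g
  have h2 : PySem.Int.mod a g = 0 := by
    rw [PySem.Int.mod_eq_zero_iff_dvd]
    exact ⟨q, by linarith⟩
  apply mul_right_cancel₀ hg
  linarith

theorem pvGcd_pos (x y : Int) (h : ¬(x = 0 ∧ y = 0)) : 0 < Int.gcd x y := by
  rcases Nat.eq_zero_or_pos (Int.gcd x y) with h0 | h0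
  · exact absurd (Int.gcd_eq_zero_iff.mp h0) h
  · exact h0

-- two primitive integer vectors with proportional components agree up to sign
theorem pvPrim (a b c d : Int) (hab : Int.gcd a b = 1) (hcd : Int.gcd c d = 1)
    (h : a * d = b * c) : (c = a ∧ d = b) ∨ (c = -a ∧ d = -b) := by
  have hco : IsCoprime a b := Int.isCoprime_iff_gcd_eq_one.mpr hab
  have hco' : IsCoprime c d := Int.isCoprime_iff_gcd_eq_one.mpr hcd
  have h1 : a ∣ c := hco.dvd_of_dvd_mul_right ⟨d, by linarith⟩
  have h2 : c ∣ a := hco'.dvd_of_dvd_mul_right ⟨b, by linarith⟩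
  have h3 : b ∣ d := hco.symm.dvd_of_dvd_mul_right ⟨c, by linarith⟩
  have h4 : d ∣ b := hco'.symm.dvd_of_dvd_mul_right ⟨a, by linarith⟩
  have hac : c = a ∨ c = -a := Int.natAbs_eq_natAbs_iff.mp
    (Nat.dvd_antisymm (Int.natAbs_dvd_natAbs.mpr h2) (Int.natAbs_dvd_natAbs.mpr h1))
  have hbd : d = b ∨ d = -b := Int.natAbs_eq_natAbs_iff.mp
    (Nat.dvd_antisymm (Int.natAbs_dvd_natAbs.mpr h4) (Int.natAbs_dvd_natAbs.mpr h3))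
  rcases hac with hc | hc <;> rcases hbd with hd | hd
  · exact Or.inl ⟨hc, hd⟩
  · have hab0 : a * b = 0 := by subst hc hd; nlinarith [h]
    rcases mul_eq_zero.mp hab0 with ha0 | hb0
    · exact Or.inr ⟨by omega, by omega⟩
    · exact Or.inl ⟨by omega, by omega⟩
  · have hab0 : a * b = 0 := by subst hc hd; nlinarith [h]
    rcases mul_eq_zero.mp hab0 with ha0 | hb0
    · exact Or.inl ⟨by omega, by omega⟩
    · exact Or.inr ⟨by omega, by omega⟩
  · exact Or.inr ⟨hc, hd⟩

-- A's normalization of a nonzero vector: divide out the gcd, with the canonical sign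
theorem pvNorm_val (x y : Int) (h : ¬(x = 0 ∧ y = 0)) :
    ∃ s x₀ y₀ : Int, (s = 1 ∨ s = -1) ∧ Int.gcd x₀ y₀ = 1 ∧
      x = (Int.gcd x y : Int) * x₀ ∧ y = (Int.gcd x y : Int) * y₀ ∧
      PySem.Int.floordiv x (pyGcd x y) = s * x₀ ∧
      PySem.Int.floordiv y (pyGcd x y) = s * y₀ ∧ s = pvSign x₀ y₀ := by
  have hpos : 0 < Int.gcd x y := pvGcd_pos x y h
  set n : Int := (Int.gcd x y : Int) with hn
  have hnpos : 0 < n := by rw [hn]; exact_mod_cast hpos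
  have hdx : n ∣ x := Int.gcd_dvd_left x y
  have hdy : n ∣ y := Int.gcd_dvd_right x y
  refine ⟨pvSign (x / n) (y / n), x / n, y / n, pvSign_cases _ _, ?_, ?_, ?_, ?_, ?_, rfl⟩
  · exact Int.gcd_div_gcd_div_gcd hpos
  · exact (Int.mul_ediv_cancel' hdx).symm
  · exact (Int.mul_ediv_cancel' hdy).symm
  · rw [pyGcd_eq x y h, ← hn]
    have hs : pvSign x y = pvSign (x / n) (y / n) := by
      conv_lhs => rw [← Int.mul_ediv_cancel' hdx, ← Int.mul_ediv_cancel' hdy]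
      exact pvSign_mul_pos n _ _ hnpos
    rw [hs]
    rcases pvSign_cases (x / n) (y / n) with h1 | h1 <;>
      rw [h1] <;>
      apply pvFloordiv_eq _ _ _ (by simp; omega) <;>
      conv_lhs => rw [← Int.mul_ediv_cancel' hdx]
    · ring
    · ring
  · rw [pyGcd_eq x y h, ← hn]
    have hs : pvSign x y = pvSign (x / n) (y / n) := by
      conv_lhs => rw [← Int.mul_ediv_cancel' hdx, ← Int.mul_ediv_cancel' hdy]
      exact pvSign_mul_pos n _ _ hnpos
    rw [hs]
    rcases pvSign_cases (x / n) (y / n) with h1 | h1 <;>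
      rw [h1] <;>
      apply pvFloordiv_eq _ _ _ (by simp; omega) <;>
      conv_lhs => rw [← Int.mul_ediv_cancel' hdy]
    · ring
    · ring

-- equal normalized directions force a zero cross product …
theorem pvNorm_eq_imp_cross_zero (a b c d : Int)
    (hv : ¬(a = 0 ∧ b = 0)) (hw : ¬(c = 0 ∧ d = 0))
    (h : (PySem.Int.floordiv a (pyGcd a b), PySem.Int.floordiv b (pyGcd a b))
       = (PySem.Int.floordiv c (pyGcd c d), PySem.Int.floordiv d (pyGcd c d))) :
    a * d - b * c = 0 := by
  obtain ⟨s1, a0, b0, hs1, _, ha, hb, hfa, hfb, _⟩ := pvNorm_val a b hv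
  obtain ⟨s2, c0, d0, hs2, _, hc, hd, hfc, hfd, _⟩ := pvNorm_val c d hw
  obtain ⟨h1, h2⟩ := Prod.mk.injEq .. ▸ h
  rw [hfa, hfc] at h1
  rw [hfb, hfd] at h2
  have ha0 : a0 = (s1 * s2) * c0 := by rcases hs1 with e | e <;> rcases hs2 with f | f <;>
    (subst e; subst f) <;> omega
  have hb0 : b0 = (s1 * s2) * d0 := by rcases hs1 with e | e <;> rcases hs2 with f | f <;>
    (subst e; subst f) <;> omega
  set n : Int := (Int.gcd a b : Int) with hn
  set m : Int := (Int.gcd c d : Int) with hm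
  rw [ha, hb, hc, hd, ha0, hb0]
  ring

-- … and a zero cross product forces equal normalized directions
theorem cross_zero_imp_pvNorm_eq (a b c d : Int)
    (hv : ¬(a = 0 ∧ b = 0)) (hw : ¬(c = 0 ∧ d = 0))
    (h : a * d - b * c = 0) :
    (PySem.Int.floordiv a (pyGcd a b), PySem.Int.floordiv b (pyGcd a b))
      = (PySem.Int.floordiv c (pyGcd c d), PySem.Int.floordiv d (pyGcd c d)) := by
  obtain ⟨s1, a0, b0, hs1, hg1, ha, hb, hfa, hfb, hsv1⟩ := pvNorm_val a b hv
  obtain ⟨s2, c0, d0, hs2, hg2, hc, hd, hfc, hfd, hsv2⟩ := pvNorm_val c d hw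
  have hn : (0:Int) < Int.gcd a b := by exact_mod_cast pvGcd_pos a b hv
  have hm : (0:Int) < Int.gcd c d := by exact_mod_cast pvGcd_pos c d hw
  set n : Int := (Int.gcd a b : Int) with hnd
  set m : Int := (Int.gcd c d : Int) with hmd
  have hcross0 : a0 * d0 = b0 * c0 := by
    have hz : n * m * (a0 * d0 - b0 * c0) = 0 := by
      rw [ha, hb, hc, hd] at h
      linarith [h, (by ring : (n*a0) * (m*d0) - (n*b0) * (m*c0) = n * m * (a0 * d0 - b0 * c0))]
    have hne : n * m ≠ 0 := by positivity
    rcases mul_eq_zero.mp hz with h' | h'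
    · exact absurd h' hne
    · omega
  rcases pvPrim a0 b0 c0 d0 hg1 hg2 hcross0 with ⟨e1, e2⟩ | ⟨e1, e2⟩
  · rw [hfa, hfb, hfc, hfd, hsv1, hsv2, e1, e2]
  · have hnz : ¬(a0 = 0 ∧ b0 = 0) := by
      rintro ⟨z1, z2⟩; rw [z1, z2] at hg1; simp [Int.gcd] at hg1
    rw [hfa, hfb, hfc, hfd, hsv1, hsv2, e1, e2, pvSign_neg a0 b0 hnz]
    rw [neg_mul_neg, neg_mul_neg]

-- literal-index lookups on destructured lists
theorem pvGet0 {al : Type} (a : al) (l : List al) : PySem.List.pyGet? (a::l) 0 = some a :=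
  PySem.List.pyGet?_zero_cons a l
theorem pvGet1 {al : Type} (a b : al) (l : List al) : PySem.List.pyGet? (a::b::l) 1 = some b := by
  rw [show (1 : Int) = ((1:Nat) : Int) from by norm_num, PySem.List.pyGet?_natCast]; rfl
theorem pvGet2 {al : Type} (a b c : al) (l : List al) : PySem.List.pyGet? (a::b::c::l) 2 = some c := by
  rw [show (2 : Int) = ((2:Nat) : Int) from by norm_num, PySem.List.pyGet?_natCast]; rfl

-- ===== VERDICT (by name: the statement is the Claim_ definition above) =====
theorem isBoomerang_spec : Claim_equal_isBoomerang := by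
  intro points _ hpre
  unfold Spec_isBoomerang
  obtain ⟨hlen, htk⟩ := hpre
  rcases points with _ | ⟨p0, _ | ⟨p1, _ | ⟨p2, rest⟩⟩⟩ <;> simp at hlen
  have h0 : 2 ≤ p0.length := htk p0 (by simp)
  have h1 : 2 ≤ p1.length := htk p1 (by simp)
  have h2 : 2 ≤ p2.length := htk p2 (by simp)
  rcases p0 with _ | ⟨x0, _ | ⟨y0, r0⟩⟩ <;> simp at h0
  rcases p1 with _ | ⟨x1, _ | ⟨y1, r1⟩⟩ <;> simp at h1
  rcases p2 with _ | ⟨x2, _ | ⟨y2, r2⟩⟩ <;> simp at h2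
  -- evaluate both ports on the destructured shape
  conv_lhs => simp only [isBoomerang]
  rw [show PySem.List.pyRange 0 3 1 = [0,1,2] from by decide]
  simp only [List.foldl]
  rw [show PySem.List.pyRange (0+1) 3 1 = [1,2] from by decide,
      show PySem.List.pyRange (1+1) 3 1 = [2] from by decide,
      show PySem.List.pyRange (2+1) 3 1 = [] from by decide]
  simp only [List.foldl]
  simp only [pvGet0, pvGet1, pvGet2]
  conv_rhs => simp only [isBoomerang_alt, Option.bind_eq_bind, Option.bind_some,
    pvGet0, pvGet1, pvGet2, Option.getD_some]
  by_cases hc1 : x0 - x1 = 0 ∧ y0 - y1 = 0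
  · simp only [if_pos hc1]
    have e1 : x1 = x0 := by omega
    have e2 : y1 = y0 := by omega
    subst e1 e2
    simp
  · simp only [if_neg hc1]
    by_cases hc2 : x0 - x2 = 0 ∧ y0 - y2 = 0
    · simp only [if_pos hc2]
      have e1 : x2 = x0 := by omega
      have e2 : y2 = y0 := by omega
      subst e1 e2
      simp
    · simp only [if_neg hc2]
      by_cases hc3 : x1 - x2 = 0 ∧ y1 - y2 = 0
      · simp only [if_pos hc3]
        have e1 : x2 = x1 := by omega
        have e2 : y2 = y1 := by omega
        subst e1 e2
        have hz : (x2 - x0) * (y2 - y0) - (y2 - y0) * (x2 - x0) = 0 := by ring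
        simp [hz]
      · simp only [if_neg hc3]
        -- all three pairwise difference vectors are nonzero
        by_cases hc : (x0 - x1) * (y0 - y2) - (y0 - y1) * (x0 - x2) = 0
        · -- collinear: the first two normalized directions coincide, the set is small
          have heq := cross_zero_imp_pvNorm_eq _ _ _ _ hc1 hc2 hc
          have hbc : (x1 - x0) * (y2 - y0) - (y1 - y0) * (x2 - x0) = 0 := by linarith
            [(by ring : (x1 - x0) * (y2 - y0) - (y1 - y0) * (x2 - x0)
              = (x0 - x1) * (y0 - y2) - (y0 - y1) * (x0 - x2))]
          simp only [hbc, ne_eq, not_true_eq_false, decide_false]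
          simp only [PySem.Set.empty, PySem.Set.add_eq_ite, List.not_mem_nil, if_false,
            List.nil_append, heq]
          simp only [List.mem_singleton, if_true]
          split_ifs <;> simp
        · -- a true boomerang: the three normalized directions are pairwise distinct
          have d12 : (PySem.Int.floordiv (x0 - x1) (pyGcd (x0 - x1) (y0 - y1)),
              PySem.Int.floordiv (y0 - y1) (pyGcd (x0 - x1) (y0 - y1)))
              ≠ (PySem.Int.floordiv (x0 - x2) (pyGcd (x0 - x2) (y0 - y2)),
              PySem.Int.floordiv (y0 - y2) (pyGcd (x0 - x2) (y0 - y2))) := fun he =>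
            hc (pvNorm_eq_imp_cross_zero _ _ _ _ hc1 hc2 he)
          have d13 : (PySem.Int.floordiv (x0 - x1) (pyGcd (x0 - x1) (y0 - y1)),
              PySem.Int.floordiv (y0 - y1) (pyGcd (x0 - x1) (y0 - y1)))
              ≠ (PySem.Int.floordiv (x1 - x2) (pyGcd (x1 - x2) (y1 - y2)),
              PySem.Int.floordiv (y1 - y2) (pyGcd (x1 - x2) (y1 - y2))) := by
            intro he
            have := pvNorm_eq_imp_cross_zero _ _ _ _ hc1 hc3 he
            exact hc (by linarith [(by ring : (x0 - x1) * (y1 - y2) - (y0 - y1) * (x1 - x2)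
              = (x0 - x1) * (y0 - y2) - (y0 - y1) * (x0 - x2))])
          have d23 : (PySem.Int.floordiv (x0 - x2) (pyGcd (x0 - x2) (y0 - y2)),
              PySem.Int.floordiv (y0 - y2) (pyGcd (x0 - x2) (y0 - y2)))
              ≠ (PySem.Int.floordiv (x1 - x2) (pyGcd (x1 - x2) (y1 - y2)),
              PySem.Int.floordiv (y1 - y2) (pyGcd (x1 - x2) (y1 - y2))) := by
            intro he
            have := pvNorm_eq_imp_cross_zero _ _ _ _ hc2 hc3 he
            exact hc (by linarith [(by ring : (x0 - x2) * (y1 - y2) - (y0 - y2) * (x1 - x2)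
              = (x0 - x1) * (y0 - y2) - (y0 - y1) * (x0 - x2))])
          have hbc : (x1 - x0) * (y2 - y0) - (y1 - y0) * (x2 - x0) ≠ 0 := by
            intro hz
            exact hc (by linarith [(by ring : (x1 - x0) * (y2 - y0) - (y1 - y0) * (x2 - x0)
              = (x0 - x1) * (y0 - y2) - (y0 - y1) * (x0 - x2))])
          simp only [ne_eq, hbc, not_false_eq_true, decide_true]
          simp only [PySem.Set.empty, PySem.Set.add_eq_ite, List.not_mem_nil, if_false,
            List.nil_append]
          split_ifs with hA hB hB
          · exact absurd (List.mem_singleton.mp hA).symm d12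
          · exact absurd (List.mem_singleton.mp hA).symm d12
          · simp only [List.mem_append, List.mem_singleton] at hB
            rcases hB with h' | h'
            · exact absurd h'.symm d13
            · exact absurd h'.symm d23
          · simp
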